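-- pv_equiv track=rewrite | github.com/joek13/advent-of-code-2021 | dec22/solution.py | choose_intersections
-- ===== SOURCE A (Python) =====
-- def compute_intersection(cuboid_a, cuboid_b):
--     # intersection with empty set is itself empty
--     if cuboid_a is None or cuboid_b is None:
--         return None
--
--     # for each axis: if the extremes are entirely outside one another,
--     # the intersection is empty
--     for (ax1, ax2), (bx1, bx2) in zip(cuboid_a, cuboid_b):
--         if not (bx1 <= ax2 <= bx2 or ax1 <= bx2 <= ax2):
--             return None
--
--     # intersection is:
--     #   the largest of each min
--     #   the smallest of each max
--     # (on each coordinate)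
--     return [(max(ax1, bx1), min(ax2, bx2)) for (ax1, ax2), (bx1, bx2) in zip(cuboid_a, cuboid_b)]
--
-- def choose_intersections(cuboids, k=1):
--     # returns list of all possible intersections between groups of k cuboids
--
--     if k < 1:
--         # not possible to pick fewer than one cuboid
--         return None
--     if k == 1:
--         # intersections of groups of 1 cuboids = the cuboids themselves
--         return cuboids
--     else:
--         # recursive case:
--         intersections = []
--         for i, cube in enumerate(cuboids):
--             # pick a starting cube,
--             # and intersect it with each of the ways
--             # to pick (k-1) cubes from the remaining cubes
--
--             for recur in choose_intersections(cuboids[i+1:], k=k-1):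
--                 intersection = compute_intersection(cube, recur)
--
--                 if intersection is not None:
--                     intersections.append(intersection)
--
--         return intersections
-- ===== SOURCE B (Python) =====
-- def _intersect(a, b):
--     # per-axis overlap test and clip (same interval rule as the original helper)
--     for (ax1, ax2), (bx1, bx2) in zip(a, b):
--         if not (bx1 <= ax2 <= bx2 or ax1 <= bx2 <= ax2):
--             return None
--     return [(max(ax1, bx1), min(ax2, bx2)) for (ax1, ax2), (bx1, bx2) in zip(a, b)]
--
--
-- def choose_intersections(cuboids, k=1):
--     # bottom-up suffix DP: rows[s] = all k-wise intersections choosable from cuboids[s:],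
--     # so each suffix subproblem is computed once instead of exponentially many times
--     if k < 1:
--         return None
--     if k == 1:
--         return cuboids
--     if k > len(cuboids):
--         return []
--     n = len(cuboids)
--     rows = [cuboids[s:] for s in range(n + 1)]
--     for _ in range(k - 1):
--         new_rows = [[]]
--         for s in range(n - 1, -1, -1):
--             row = [x for x in (_intersect(cuboids[s], r) for r in rows[s + 1]) if x is not None]
--             new_rows.insert(0, row + new_rows[0])
--         rows = new_rows
--     return rows[0]
-- ===== Notes on version B (the rewrite author's own statement) =====
-- stated objective: faster
-- what changed: Replaces A's exponential recursion, which re-solves choose_intersections on every overlapping suffix at every level, by a bottom-up suffix dynamic program: one table row per k-level, each suffix subproblem computed exactly once.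
import Mathlib
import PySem

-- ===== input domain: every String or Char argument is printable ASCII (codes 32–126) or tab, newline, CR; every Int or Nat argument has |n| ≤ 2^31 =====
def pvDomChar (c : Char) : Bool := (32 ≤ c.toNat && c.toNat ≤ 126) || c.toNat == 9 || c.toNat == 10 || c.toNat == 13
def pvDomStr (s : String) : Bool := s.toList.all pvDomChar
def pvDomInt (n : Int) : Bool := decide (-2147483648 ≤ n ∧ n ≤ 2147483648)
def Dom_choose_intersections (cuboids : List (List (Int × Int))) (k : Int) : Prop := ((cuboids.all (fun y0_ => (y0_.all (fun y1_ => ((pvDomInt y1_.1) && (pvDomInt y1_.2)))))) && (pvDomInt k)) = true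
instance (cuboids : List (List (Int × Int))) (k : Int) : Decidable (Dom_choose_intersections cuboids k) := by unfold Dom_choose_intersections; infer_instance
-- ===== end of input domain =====

-- B replaces A's exponential recursion (which re-solves every suffix subproblem at every level)
-- by a bottom-up suffix dynamic program computing each suffix subproblem once; same return value.

-- ===== PORT A =====
-- helper: Python's compute_intersection (None-aware)
def compute_intersection (ca cb : Option (List (Int × Int))) : Option (List (Int × Int)) :=
  match ca, cb with
  | none, _ => none
  | some _, none => none
  | some a, some b =>
      if (a.zip b).all (fun p =>
          (decide (p.2.1 ≤ p.1.2) && decide (p.1.2 ≤ p.2.2)) ||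
          (decide (p.1.1 ≤ p.2.2) && decide (p.2.2 ≤ p.1.2))) then
        some ((a.zip b).map (fun p => (max p.1.1 p.2.1, min p.1.2 p.2.2)))
      else none

def choose_intersections (cuboids : List (List (Int × Int))) (k : Int) : Option (List (List (Int × Int))) :=
  if k < 1 then none
  else if k = 1 then some cuboids
  else
    some ((PySem.List.enumerate cuboids).foldl (fun acc ic =>
      -- the recursive call returns `some _` since k-1 ≥ 1; Python iterates the returned list;
      -- 'if intersection is not None: intersections.append(intersection)' is the append of
      -- Option.toList (empty for None, the single element otherwise)
      ((choose_intersections (PySem.List.slice cuboids (some (ic.1 + 1)) none) (k - 1)).getD []).foldl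
        (fun acc2 recur =>
          acc2 ++ (compute_intersection (some ic.2) (some recur)).toList) acc) [])
termination_by k.toNat
decreasing_by omega

-- ===== PORT B =====
-- B's per-axis intersection helper (no None arguments)
def interAlt (a b : List (Int × Int)) : Option (List (Int × Int)) :=
  if (a.zip b).all (fun p =>
      (decide (p.2.1 ≤ p.1.2) && decide (p.1.2 ≤ p.2.2)) ||
      (decide (p.1.1 ≤ p.2.2) && decide (p.2.2 ≤ p.1.2))) then
    some ((a.zip b).map (fun p => (max p.1.1 p.2.1, min p.1.2 p.2.2)))
  else none

-- Source B's inner loop 'for s in range(n-1, -1, -1)' building new_rows back-to-front,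
-- transcribed as the corresponding structural recursion over cs aligned with rows
def nextRows (cs : List (List (Int × Int))) (rows : List (List (List (Int × Int)))) :
    List (List (List (Int × Int))) :=
  match cs, rows with
  | [], _ => [[]]
  | _ :: _, [] => [[]]   -- unreachable: rows always has length cs.length + 1
  | c :: rest, _ :: rrest =>
      let tail := nextRows rest rrest
      let row := (rrest.headD []).filterMap (fun r => interAlt c r)
      (row ++ tail.headD []) :: tail

def choose_intersections_alt (cuboids : List (List (Int × Int))) (k : Int) :
    Option (List (List (Int × Int))) :=
  if k < 1 then none
  else if k = 1 then some cuboids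
  else if (cuboids.length : Int) < k then some []
  else
    let rows0 := (List.range (cuboids.length + 1)).map (fun s => cuboids.drop s)
    some (((fun r => nextRows cuboids r)^[(k - 1).toNat] rows0).headD [])

-- ===== PRECONDITION & SPEC =====
def Spec_choose_intersections (cuboids : List (List (Int × Int))) (k : Int) (out : Option (List (List (Int × Int)))) : Prop := out = choose_intersections_alt cuboids k
instance (cuboids : List (List (Int × Int))) (k : Int) (out : Option (List (List (Int × Int)))) : Decidable (Spec_choose_intersections cuboids k out) := by unfold Spec_choose_intersections; infer_instance

-- ===== CLAIM (what is proved, stated in full; the proofs are below) =====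
def Claim_equal_choose_intersections : Prop := ∀ (cuboids : List (List (Int × Int))) (k : Int), Dom_choose_intersections cuboids k → Spec_choose_intersections cuboids k (choose_intersections cuboids k)

-- ===== LEMMAS AND PROOFS =====

-- A's step over one enumerate entry, as a single list-producing function
def stepFn (cuboids : List (List (Int × Int))) (k : Int) (ic : Int × List (Int × Int)) :
    List (List (Int × Int)) :=
  ((choose_intersections (PySem.List.slice cuboids (some (ic.1 + 1)) none) (k - 1)).getD []).flatMap
    (fun r => (compute_intersection (some ic.2) (some r)).toList)

theorem A_flat (cuboids : List (List (Int × Int))) (k : Int) (h2 : 2 ≤ k) :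
    choose_intersections cuboids k
      = some ((PySem.List.enumerate cuboids).flatMap (stepFn cuboids k)) := by
  rw [choose_intersections]
  rw [if_neg (by omega), if_neg (by omega)]
  congr 1
  have hstep : (fun (acc : List (List (Int × Int))) (ic : Int × List (Int × Int)) =>
      ((choose_intersections (PySem.List.slice cuboids (some (ic.1 + 1)) none) (k - 1)).getD []).foldl
        (fun acc2 recur =>
          acc2 ++ (compute_intersection (some ic.2) (some recur)).toList) acc)
      = fun acc ic => acc ++ stepFn cuboids k ic := by
    funext acc ic
    simp only [stepFn]
    rw [PySem.List.foldl_append_eq_flatMap]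
  rw [hstep, PySem.List.foldl_append_eq_flatMap]
  simp

theorem enumerate_shift {α : Type} :
    ∀ (xs : List α) (s : Int),
      PySem.List.enumerate xs (s + 1)
        = (PySem.List.enumerate xs s).map (fun p => (p.1 + 1, p.2)) := by
  intro xs
  induction xs with
  | nil => intro s; simp [PySem.List.enumerate_nil]
  | cons x xs ih =>
      intro s
      rw [PySem.List.enumerate_cons, PySem.List.enumerate_cons]
      simp only [List.map_cons]
      rw [ih (s + 1)]

theorem A_one (cs : List (List (Int × Int))) : choose_intersections cs 1 = some cs := by
  rw [choose_intersections]; norm_num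

theorem A_cons (c : List (Int × Int)) (rest : List (List (Int × Int))) (k : Int) (h2 : 2 ≤ k) :
    choose_intersections (c :: rest) k
      = some ((((choose_intersections rest (k - 1)).getD []).filterMap
            (fun r => compute_intersection (some c) (some r)))
          ++ (choose_intersections rest k).getD []) := by
  rw [A_flat _ _ h2]
  rw [PySem.List.enumerate_cons]
  rw [List.flatMap_cons]
  congr 1
  have h0 : stepFn (c :: rest) k (0, c)
      = ((choose_intersections rest (k - 1)).getD []).filterMap
          (fun r => compute_intersection (some c) (some r)) := by
    unfold stepFn
    rw [List.filterMap_eq_flatMap_toList]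
    norm_num [PySem.List.slice_from_one]
  rw [h0]
  congr 1
  -- shift the start index back to 0 and compare with A on rest
  rw [enumerate_shift rest 0]
  rw [List.flatMap_map]
  rw [A_flat rest _ h2, Option.getD_some]
  apply List.flatMap_congr
  intro p hp
  rcases (PySem.List.mem_enumerate_iff _ _ _).1 hp with ⟨j, hj, hpj⟩
  subst hpj
  unfold stepFn
  congr 2
  have e1 : (0 : Int) + (j : Int) + 1 + 1 = ((j + 2 : Nat) : Int) := by push_cast; ring
  have e2 : (0 : Int) + (j : Int) + 1 = ((j + 1 : Nat) : Int) := by push_cast; ring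
  rw [e1, e2, PySem.List.slice_from_natCast, PySem.List.slice_from_natCast]
  rfl

theorem A_nil (k : Int) (h2 : 2 ≤ k) : choose_intersections [] k = some [] := by
  rw [A_flat _ _ h2]
  simp [PySem.List.enumerate_nil]

theorem A_some (cs : List (List (Int × Int))) (k : Int) (h1 : 1 ≤ k) :
    ∃ l, choose_intersections cs k = some l := by
  rw [choose_intersections]
  rw [if_neg (by omega)]
  by_cases h : k = 1
  · rw [if_pos h]; exact ⟨_, rfl⟩
  · rw [if_neg h]; exact ⟨_, rfl⟩

theorem A_big : ∀ (cs : List (List (Int × Int))) (k : Int), 2 ≤ k → (cs.length : Int) < k →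
    choose_intersections cs k = some [] := by
  intro cs
  induction cs with
  | nil => intro k h2 _; exact A_nil k h2
  | cons c rest ih =>
      intro k h2 hlen
      rw [A_cons _ _ _ h2]
      simp only [List.length_cons] at hlen
      have hrest : (rest.length : Int) < k - 1 := by push_cast at hlen ⊢; omega
      have h2' : choose_intersections rest k = some [] := ih k h2 (by omega)
      have h1' : ((choose_intersections rest (k - 1)).getD []).filterMap
          (fun r => compute_intersection (some c) (some r)) = [] := by
        by_cases hk : 2 ≤ k - 1
        · rw [ih (k - 1) hk hrest]; rfl
        · have hk1 : k = 2 := by omega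
          subst hk1
          have : rest = [] := by
            cases rest with
            | nil => rfl
            | cons a b => simp at hrest; omega
          subst this
          rw [show (2 : Int) - 1 = 1 by norm_num, A_one]
          rfl
      rw [h1', h2']
      rfl

-- B-side characterisation: rowsOf m cs lists A's (getD-ed) results on all suffixes of cs
def rowsOf (m : Int) : List (List (Int × Int)) → List (List (List (Int × Int)))
  | [] => [[]]
  | c :: rest => (choose_intersections (c :: rest) m).getD [] :: rowsOf m rest

theorem getD_A_nil (m : Int) (h1 : 1 ≤ m) : (choose_intersections [] m).getD [] = [] := by
  by_cases h : m = 1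
  · subst h; rw [A_one]; rfl
  · rw [A_nil m (by omega)]; rfl

theorem rowsOf_headD (cs : List (List (Int × Int))) (m : Int) (h1 : 1 ≤ m) :
    (rowsOf m cs).headD [] = (choose_intersections cs m).getD [] := by
  cases cs with
  | nil => simp [rowsOf, getD_A_nil m h1]
  | cons c rest => rfl

theorem rows0_eq : ∀ (cs : List (List (Int × Int))),
    (List.range (cs.length + 1)).map (fun s => cs.drop s) = rowsOf 1 cs := by
  intro cs
  induction cs with
  | nil => simp [rowsOf, List.range_succ]
  | cons c rest ih =>
      rw [List.length_cons]
      rw [show rest.length + 1 + 1 = (rest.length + 1) + 1 from rfl]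
      rw [List.range_succ_eq_map]
      simp only [List.map_cons, List.drop_zero, List.map_map]
      have : ((fun s => List.drop s (c :: rest)) ∘ Nat.succ) = fun s => rest.drop s := by
        funext s; simp
      rw [this, ih]
      simp [rowsOf, A_one]

theorem nextRows_rowsOf : ∀ (cs : List (List (Int × Int))) (m : Int), 1 ≤ m →
    nextRows cs (rowsOf m cs) = rowsOf (m + 1) cs := by
  intro cs
  induction cs with
  | nil => intro m _; rfl
  | cons c rest ih =>
      intro m h1
      show (((rowsOf m rest).headD []).filterMap (fun r => interAlt c r)
              ++ (nextRows rest (rowsOf m rest)).headD []) :: nextRows rest (rowsOf m rest)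
          = rowsOf (m + 1) (c :: rest)
      rw [ih m h1, rowsOf_headD rest m h1, rowsOf_headD rest (m + 1) (by omega)]
      show _ = (choose_intersections (c :: rest) (m + 1)).getD [] :: rowsOf (m + 1) rest
      rw [A_cons c rest (m + 1) (by omega)]
      simp only [add_sub_cancel_right, Option.getD_some]
      rfl

theorem iter_rowsOf (cs : List (List (Int × Int))) :
    ∀ t : Nat, (fun r => nextRows cs r)^[t] (rowsOf 1 cs) = rowsOf (1 + (t : Int)) cs := by
  intro t
  induction t with
  | zero => simp
  | succ t ih =>
      rw [Function.iterate_succ_apply', ih]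
      rw [nextRows_rowsOf cs (1 + (t : Int)) (by omega)]
      have : (1 : Int) + (t : Int) + 1 = 1 + ((t + 1 : Nat) : Int) := by push_cast; ring
      rw [this]

-- ===== VERDICT (by name: the statement is the Claim_ definition above) =====
theorem choose_intersections_spec : Claim_equal_choose_intersections := by
  intro cuboids k _
  unfold Spec_choose_intersections
  unfold choose_intersections_alt
  by_cases hlt : k < 1
  · rw [if_pos hlt, choose_intersections, if_pos hlt]
  · rw [if_neg hlt]
    by_cases h1 : k = 1
    · subst h1
      rw [if_pos rfl, A_one]
    · rw [if_neg h1]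
      have h2 : 2 ≤ k := by omega
      by_cases hbig : (cuboids.length : Int) < k
      · rw [if_pos hbig, A_big cuboids k h2 hbig]
      · rw [if_neg hbig]
        simp only []
        rw [rows0_eq, iter_rowsOf]
        have hcast : (1 : Int) + ((k - 1).toNat : Int) = k := by omega
        rw [hcast, rowsOf_headD cuboids k (by omega)]
        rcases A_some cuboids k (by omega) with ⟨l, hl⟩
        rw [hl]
        rfl
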